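-- pv_equiv track=rewrite | github.com/JAFigueroaAcero/Gravitation_Simulator_v6.plus | Gravitation_Simulator/v8.3.0/pruebas.py | calc_min
-- ===== SOURCE A (Python) =====
-- def calc_min(var):
--     sindex = 0
--     findex = 0
--     value = var
--     if '(' in var:
--         sindex = var.index('(')
--         findex = var.index(')')
--         if '(' in var[sindex+1: findex + 1]:
--             value = calc_min(var[sindex + 1: findex + 1])
--         else:
--             value = var[sindex: findex + 1]
--     else:
--         return value
--     return value
-- ===== SOURCE B (Python) =====
-- def calc_min(var):
--     # Single backward scan instead of A's recursive re-searching: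
--     # the answer is var[L:f+1] where f is the first ')' and L the last '(' before it.
--     if '(' not in var:
--         return var
--     f = var.index(')')
--     L = f
--     while L >= 0 and var[L] != '(':
--         L -= 1
--     if L < 0:
--         return ''
--     return var[L:f + 1]
-- ===== Notes on version B (the rewrite author's own statement) =====
-- stated objective: alternative
-- what changed: A recursively re-slices and re-scans substrings; B computes the answer directly as var[L:f+1] where f is the first ')' (one index call) and L is found by a single backward character scan from f, with no recursion and no repeated substring searches.
import Mathlib
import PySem

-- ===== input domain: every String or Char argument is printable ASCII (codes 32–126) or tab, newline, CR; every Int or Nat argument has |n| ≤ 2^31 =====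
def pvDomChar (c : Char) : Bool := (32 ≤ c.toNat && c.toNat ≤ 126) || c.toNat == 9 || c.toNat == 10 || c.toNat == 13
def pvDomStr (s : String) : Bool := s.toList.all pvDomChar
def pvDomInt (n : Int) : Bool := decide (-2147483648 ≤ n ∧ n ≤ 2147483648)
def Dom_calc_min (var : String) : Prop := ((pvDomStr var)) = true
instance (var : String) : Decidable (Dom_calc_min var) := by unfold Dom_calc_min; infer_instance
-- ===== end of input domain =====

-- B replaces A's recursive re-slicing with one forward index(')') and one backward character scan; equivalence is about the return value on inputs where A does not raise.

-- ===== PORT A =====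
-- A ported on the code-point list; `calc_min` wraps it back into a String.
-- fuel = var.length is only a structural-termination guard: each recursive call strictly
-- shrinks the list (proved by the equivalence below), so the 0-fuel branch is never the result.
def calcMinA : Nat → List Char → List Char
  | 0, var => var
  | fuel + 1, var =>
  if PySem.Chars.isIn ['('] var = true then
    let sindex := (PySem.Chars.find var ['(']).toNat
    let findex := (PySem.Chars.find var [')']).toNat
    if PySem.Chars.isIn ['('] (PySem.List.slice var (some ((sindex : Int) + 1)) (some ((findex : Int) + 1))) = true then
      calcMinA fuel (PySem.List.slice var (some ((sindex : Int) + 1)) (some ((findex : Int) + 1)))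
    else
      PySem.List.slice var (some (sindex : Int)) (some ((findex : Int) + 1))
  else var

def calc_min (var : String) : String := String.ofList (calcMinA var.toList.length var.toList)

-- ===== PORT B =====
-- the `while L >= 0 and var[L] != '(': L -= 1` loop of Source B; returns the final L (none = loop left with L < 0)
def calcMinBLoop (var : List Char) (L : Nat) : Option Nat :=
  if var[L]? = some '(' then some L
  else if L = 0 then none
  else calcMinBLoop var (L - 1)

def calcMinB (var : List Char) : List Char :=
  if PySem.Chars.isIn ['('] var = true then
    let f := (PySem.Chars.find var [')']).toNat
    match calcMinBLoop var f with
    | none => []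
    | some L => PySem.List.slice var (some (L : Int)) (some ((f : Int) + 1))
  else var

def calc_min_alt (var : String) : String := String.ofList (calcMinB var.toList)

-- ===== PRECONDITION & SPEC =====
-- A (and B) raise ValueError from var.index(')') exactly when '(' occurs in var but ')' does not.
def Pre_calc_min (var : String) : Prop := PySem.Str.isIn "(" var = true → PySem.Str.isIn ")" var = true
instance (var : String) : Decidable (Pre_calc_min var) := by unfold Pre_calc_min; infer_instance
def pvWitness_calc_min : String := "a(b(c)d)e"

def Spec_calc_min (var : String) (out : String) : Prop := out = calc_min_alt var
instance (var : String) (out : String) : Decidable (Spec_calc_min var out) := by unfold Spec_calc_min; infer_instance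

-- ===== CLAIM (what is proved, stated in full; the proofs are below) =====
def Claim_equal_calc_min : Prop := ∀ (var : String), Dom_calc_min var → Pre_calc_min var → Spec_calc_min var (calc_min var)

-- ===== LEMMAS AND PROOFS =====

theorem singleton_prefix_iff_getElem (c : Char) (l : List Char) : [c] <+: l ↔ l[0]? = some c := by
  cases l with
  | nil => simp
  | cons x t => simp [List.cons_prefix_cons, eq_comm]

theorem mem_iff_getElem (c : Char) (l : List Char) : c ∈ l ↔ ∃ i : Nat, l[i]? = some c := by
  constructor
  · intro h
    obtain ⟨i, hi, he⟩ := List.getElem_of_mem h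
    exact ⟨i, by simp [List.getElem?_eq_getElem hi, he]⟩
  · rintro ⟨i, hi⟩
    exact List.mem_of_getElem? hi

-- find points at the unique minimal position of a character
theorem find_eq_of (l : List Char) (c : Char) (p : Nat) (hp : l[p]? = some c)
    (hmin : ∀ i < p, l[i]? ≠ some c) : PySem.Chars.find l [c] = (p : Int) := by
  have hmem : c ∈ l := List.mem_of_getElem? hp
  have hin : PySem.Chars.isIn [c] l = true :=
    (PySem.Chars.isIn_iff_infix [c] l).mpr ((List.singleton_infix_iff c l).mpr hmem)
  have h0 : 0 ≤ PySem.Chars.find l [c] :=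
    (PySem.Chars.find_nonneg_iff l [c]).mpr ((List.singleton_infix_iff c l).mpr hmem)
  obtain ⟨hpre, hlow⟩ := PySem.Chars.find_spec h0
  set s := (PySem.Chars.find l [c]).toNat with hs
  have hsc : l[s]? = some c := by
    have := (singleton_prefix_iff_getElem c (l.drop s)).mp hpre
    rwa [List.getElem?_drop, Nat.add_zero] at this
  have hps : p = s := by
    rcases Nat.lt_trichotomy p s with h | h | h
    · exact absurd ((singleton_prefix_iff_getElem c (l.drop p)).mpr
        (by rwa [List.getElem?_drop, Nat.add_zero])) (hlow p h)
    · exact h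
    · exact absurd hsc (hmin s h)
  rw [hps, hs, Int.toNat_of_nonneg h0]

theorem find_toNat_spec (l : List Char) (c : Char) (h : PySem.Chars.isIn [c] l = true) :
    ∃ s : Nat, PySem.Chars.find l [c] = (s : Int) ∧ l[s]? = some c ∧ ∀ i < s, l[i]? ≠ some c := by
  have h0 : 0 ≤ PySem.Chars.find l [c] :=
    (PySem.Chars.find_nonneg_iff l [c]).mpr ((PySem.Chars.isIn_iff_infix [c] l).mp h)
  obtain ⟨hpre, hlow⟩ := PySem.Chars.find_spec h0
  refine ⟨(PySem.Chars.find l [c]).toNat, (Int.toNat_of_nonneg h0).symm, ?_, ?_⟩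
  · have := (singleton_prefix_iff_getElem c (l.drop _)).mp hpre
    rwa [List.getElem?_drop, Nat.add_zero] at this
  · intro i hi hic
    exact hlow i hi ((singleton_prefix_iff_getElem c (l.drop i)).mpr
      (by rwa [List.getElem?_drop, Nat.add_zero]))

theorem loop_eq_none_of (var : List Char) (L : Nat) (h : ∀ i ≤ L, var[i]? ≠ some '(') :
    calcMinBLoop var L = none := by
  induction L with
  | zero => rw [calcMinBLoop]; simp [h 0 le_rfl]
  | succ m ih =>
    rw [calcMinBLoop]
    simp only [h (m + 1) le_rfl, if_false, Nat.succ_ne_zero, Nat.add_sub_cancel]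
    exact ih fun i hi => h i (Nat.le_succ_of_le hi)

theorem loop_eq_some_of (var : List Char) (L K : Nat) (hK : K ≤ L) (hc : var[K]? = some '(')
    (hmax : ∀ i, K < i → i ≤ L → var[i]? ≠ some '(') : calcMinBLoop var L = some K := by
  induction L with
  | zero =>
    interval_cases K
    rw [calcMinBLoop]; simp [hc]
  | succ m ih =>
    rw [calcMinBLoop]
    rcases Nat.lt_or_ge K (m + 1) with h | h
    · have hne : var[m + 1]? ≠ some '(' := hmax (m + 1) h le_rfl
      simp only [hne, if_false, Nat.succ_ne_zero, Nat.add_sub_cancel]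
      exact ih (Nat.lt_succ_iff.mp h) fun i h1 h2 => hmax i h1 (Nat.le_succ_of_le h2)
    · have : K = m + 1 := le_antisymm hK h
      subst this
      simp [hc]

theorem getElem?_drop_take (l : List Char) (a t j : Nat) (h : j < t) :
    ((l.drop a).take t)[j]? = l[a + j]? := by
  rw [List.getElem?_take_of_lt h, List.getElem?_drop]

-- forward characterisation of the loop
theorem loop_spec (var : List Char) (L : Nat) :
    (calcMinBLoop var L = none → ∀ i ≤ L, var[i]? ≠ some '(') ∧
    (∀ K, calcMinBLoop var L = some K →
      K ≤ L ∧ var[K]? = some '(' ∧ ∀ i, K < i → i ≤ L → var[i]? ≠ some '(') := by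
  induction L with
  | zero =>
    rw [calcMinBLoop]
    by_cases h : var[0]? = some '('
    · simp only [if_pos h]
      refine ⟨by simp, fun K hK => ?_⟩
      simp only [Option.some.injEq] at hK
      subst hK
      exact ⟨le_rfl, h, by omega⟩
    · simp only [if_neg h]
      refine ⟨fun _ i hi => ?_, by simp⟩
      interval_cases i
      exact h
  | succ m ih =>
    rw [calcMinBLoop]
    by_cases h : var[m + 1]? = some '('
    · simp only [if_pos h]
      refine ⟨by simp, fun K hK => ?_⟩
      simp only [Option.some.injEq] at hK
      subst hK
      exact ⟨le_rfl, h, by omega⟩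
    · simp only [if_neg h, Nat.succ_ne_zero, Nat.add_sub_cancel]
      refine ⟨fun hn i hi => ?_, fun K hK => ?_⟩
      · rcases Nat.lt_or_ge i (m + 1) with h2 | h2
        · exact ih.1 hn i (Nat.lt_succ_iff.mp h2)
        · have : i = m + 1 := le_antisymm hi h2
          subst this; exact h
      · obtain ⟨h1, h2, h3⟩ := ih.2 K hK
        refine ⟨Nat.le_succ_of_le h1, h2, fun i hi1 hi2 => ?_⟩
        rcases Nat.lt_or_ge i (m + 1) with h4 | h4
        · exact h3 i hi1 (Nat.lt_succ_iff.mp h4)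
        · have : i = m + 1 := le_antisymm hi2 h4
          subst this; exact h

-- the main equivalence on code-point lists
theorem calcMinA_eq_calcMinB (n : Nat) : ∀ (l : List Char), l.length ≤ n →
    (PySem.Chars.isIn ['('] l = true → PySem.Chars.isIn [')'] l = true) →
    calcMinA n l = calcMinB l := by
  induction n with
  | zero =>
    intro l hlen _
    have : l = [] := List.length_eq_zero_iff.mp (Nat.le_zero.mp hlen)
    subst this
    have hF : PySem.Chars.isIn ['('] ([] : List Char) = false := by decide
    rw [calcMinA, calcMinB]
    simp [hF]
  | succ m ih =>
    intro l hlen pre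
    rw [calcMinA, calcMinB]
    by_cases hin : PySem.Chars.isIn ['('] l = true
    case neg => simp [hin]
    obtain ⟨s, hsfind, hsc, hsmin⟩ := find_toNat_spec l '(' hin
    obtain ⟨f, hffind, hfc, hfmin⟩ := find_toNat_spec l ')' (pre hin)
    have hsl : s < l.length := by
      obtain ⟨h, -⟩ := List.getElem?_eq_some_iff.mp hsc; exact h
    have hfl : f < l.length := by
      obtain ⟨h, -⟩ := List.getElem?_eq_some_iff.mp hfc; exact h
    have hsf : s ≠ f := fun h => by rw [h, hfc] at hsc; simp at hsc
    have e1 : ((s : Int) + 1) = ((s + 1 : Nat) : Int) := by push_cast; ring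
    have e2 : ((f : Int) + 1) = ((f + 1 : Nat) : Int) := by push_cast; ring
    simp only [if_pos hin, hsfind, hffind, Int.toNat_natCast, e1, e2,
      PySem.List.slice_natCast, Nat.succ_sub_succ]
    -- mid := (l.drop (s+1)).take (f - s)
    by_cases hmid : PySem.Chars.isIn ['('] ((l.drop (s + 1)).take (f - s)) = true
    · -- recursive branch of A
      have hmem : '(' ∈ (l.drop (s + 1)).take (f - s) :=
        (List.singleton_infix_iff _ _).mp ((PySem.Chars.isIn_iff_infix _ _).mp hmid)
      have hne : (l.drop (s + 1)).take (f - s) ≠ [] := List.ne_nil_of_mem hmem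
      have hsltf : s < f := by
        by_contra h
        have : f - s = 0 := by omega
        simp [this] at hne
      have hmlen : ((l.drop (s + 1)).take (f - s)).length = f - s := by
        simp only [List.length_take, List.length_drop]; omega
      -- Pre for mid : ')' at position f - s - 1
      have hmidr : ((l.drop (s + 1)).take (f - s))[f - s - 1]? = some ')' := by
        rw [getElem?_drop_take l (s + 1) (f - s) (f - s - 1) (by omega)]
        have : s + 1 + (f - s - 1) = f := by omega
        rw [this]; exact hfc
      have hpre2 : PySem.Chars.isIn ['('] ((l.drop (s + 1)).take (f - s)) = true →
          PySem.Chars.isIn [')'] ((l.drop (s + 1)).take (f - s)) = true := fun _ =>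
        (PySem.Chars.isIn_iff_infix _ _).mpr ((List.singleton_infix_iff _ _).mpr
          (List.mem_of_getElem? hmidr))
      have hih := ih ((l.drop (s + 1)).take (f - s)) (by omega) hpre2
      simp only [if_pos hmid, hih]
      -- now compute calcMinB of mid and of l
      rw [calcMinB]
      simp only [if_pos hmid]
      -- find mid [')'] = f - s - 1
      have hfind2 : PySem.Chars.find ((l.drop (s + 1)).take (f - s)) [')'] = ((f - s - 1 : Nat) : Int) := by
        apply find_eq_of _ _ _ hmidr
        intro j hj
        rw [getElem?_drop_take l (s + 1) (f - s) j (by omega)]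
        exact hfmin (s + 1 + j) (by omega)
      -- the loop on l finds some K with s + 1 ≤ K
      obtain ⟨j, hjlt, hjc⟩ : ∃ j, j < f - s ∧ ((l.drop (s + 1)).take (f - s))[j]? = some '(' := by
        obtain ⟨j, hj⟩ := (mem_iff_getElem '(' _).mp hmem
        obtain ⟨h, -⟩ := List.getElem?_eq_some_iff.mp hj
        rw [hmlen] at h
        exact ⟨j, h, hj⟩
      rw [getElem?_drop_take l (s + 1) (f - s) j hjlt] at hjc
      rcases hloop : calcMinBLoop l f with _ | K
      · exact absurd hjc ((loop_spec l f).1 hloop (s + 1 + j) (by omega))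
      obtain ⟨hK1, hK2, hK3⟩ := (loop_spec l f).2 K hloop
      have hKs : s + 1 ≤ K := by
        by_contra h
        exact (hK3 (s + 1 + j) (by omega) (by omega)) hjc
      have hKf : K ≠ f := fun h => by rw [h, hfc] at hK2; simp at hK2
      -- loop on mid returns K - s - 1
      have hloop2 : calcMinBLoop ((l.drop (s + 1)).take (f - s)) (f - s - 1) = some (K - s - 1) := by
        apply loop_eq_some_of _ _ _ (by omega)
        · rw [getElem?_drop_take l (s + 1) (f - s) (K - s - 1) (by omega)]
          have : s + 1 + (K - s - 1) = K := by omega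
          rw [this]; exact hK2
        · intro i hi1 hi2
          rw [getElem?_drop_take l (s + 1) (f - s) i (by omega)]
          exact hK3 (s + 1 + i) (by omega) (by omega)
      simp only [hfind2, Int.toNat_natCast, hloop2]
      -- final slice equality
      have e4 : (((f - s - 1 : Nat) : Int) + 1) = ((f - s : Nat) : Int) := by
        push_cast [Nat.sub_sub]; omega
      rw [e4, PySem.List.slice_natCast, List.drop_take, List.take_take, Nat.min_self]
      have e7 : f - s - (K - s - 1) = f + 1 - K := by omega
      rw [e7]
      congr 1
      rw [List.drop_drop]
      congr 1
      omega
    · -- non-recursive branch of A: result is l[s : f + 1]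
      simp only [if_neg hmid]
      have hnomid : ∀ j : Nat, ((l.drop (s + 1)).take (f - s))[j]? ≠ some '(' := by
        intro j hj
        exact absurd ((PySem.Chars.isIn_iff_infix _ _).mpr ((List.singleton_infix_iff _ _).mpr
          (List.mem_of_getElem? hj))) (by simpa using hmid)
      rcases Nat.lt_or_ge s f with hsltf | hfles
      · -- s < f : loop returns s
        have hloopl : calcMinBLoop l f = some s := by
          apply loop_eq_some_of _ _ _ (by omega) hsc
          intro i hi1 hi2
          rcases Nat.lt_or_ge i f with h4 | h4
          · have := hnomid (i - s - 1)
            rwa [getElem?_drop_take l (s + 1) (f - s) (i - s - 1) (by omega),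
              (by omega : s + 1 + (i - s - 1) = i)] at this
          · have : i = f := by omega
            subst this
            intro h; rw [hfc] at h; simp at h
        simp only [hloopl]
      · -- f < s : both sides are []
        have hsltf : f < s := by omega
        have hloopl : calcMinBLoop l f = none := by
          apply loop_eq_none_of
          intro i hi
          exact hsmin i (by omega)
        simp only [hloopl]
        have : f + 1 - s = 0 := by omega
        rw [this, List.take_zero]

-- ===== VERDICT (by name: the statement is the Claim_ definition above) =====
theorem calc_min_spec : Claim_equal_calc_min := by
  intro var _dom pre
  unfold Spec_calc_min calc_min calc_min_alt
  congr 1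
  apply calcMinA_eq_calcMinB var.toList.length _ le_rfl
  intro hin
  have h1 : PySem.Str.isIn "(" var = true := by
    simpa using hin
  have h2 := pre h1
  simpa using h2
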